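-- pv_equiv track=rewrite | github.com/hdashnow/STR-pipelines | simulate_reads/generate_stutter_vcfs.py | trim_indel
-- ===== SOURCE A (Python) =====
-- def trim_indel(ref, alt):
--     """Generate the shortest representation of an indel my removing the rightmost bases.
--     XXX Currently only working with a single alt, should be generalised for multiple.
--
--     Args:
--         ref (str): The version of the sequence in the reference genome.
--         alt (str): Alternative version of the sequence caused by an insertion or
--         deletion.
--
--     Returns:
--         (ref_normalised str, alt_normalised str)
--     """
--     if min(len(ref), len(alt)) <= 1:
--         return ref, alt
--     if ref == alt:
--         raise ValueError("Ref and alt are the same. ref: {0} alt: {1}".format(ref, alt))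
--     for i in range(1, min(len(ref), len(alt))):
--         if ref[-i] != alt[-i]: # Check if the rightmost bases are different
--             if i == 1: # The last bases are identical, so can't be trimmed
--                 return ref, alt
--             else:
--                 return ref[:-i+1], alt[:-i+1]
--     return ref[:-i], alt[:-i]
-- ===== SOURCE B (Python) =====
-- def trim_indel(ref, alt):
--     """Shortest indel representation: binary-search the largest trimmable common
--     suffix length (slice comparisons), then slice once."""
--     n = min(len(ref), len(alt))
--     if n <= 1:
--         return ref, alt
--     if ref == alt:
--         raise ValueError("Ref and alt are the same. ref: {0} alt: {1}".format(ref, alt))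
--     lo, hi = 0, n - 1
--     while lo < hi:
--         mid = (lo + hi + 1) // 2
--         if ref[len(ref) - mid:] == alt[len(alt) - mid:]:
--             lo = mid
--         else:
--             hi = mid - 1
--     if lo == 0:
--         return ref, alt
--     return ref[:-lo], alt[:-lo]
-- ===== Notes on version B (the rewrite author's own statement) =====
-- stated objective: alternative
-- what changed: B binary-searches the largest trimmable common-suffix length (comparing whole tail slices, exploiting that 'last m chars equal' is monotone in m) and then slices once, instead of A's linear backward character scan that returns from inside the loop.
import Mathlib
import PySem

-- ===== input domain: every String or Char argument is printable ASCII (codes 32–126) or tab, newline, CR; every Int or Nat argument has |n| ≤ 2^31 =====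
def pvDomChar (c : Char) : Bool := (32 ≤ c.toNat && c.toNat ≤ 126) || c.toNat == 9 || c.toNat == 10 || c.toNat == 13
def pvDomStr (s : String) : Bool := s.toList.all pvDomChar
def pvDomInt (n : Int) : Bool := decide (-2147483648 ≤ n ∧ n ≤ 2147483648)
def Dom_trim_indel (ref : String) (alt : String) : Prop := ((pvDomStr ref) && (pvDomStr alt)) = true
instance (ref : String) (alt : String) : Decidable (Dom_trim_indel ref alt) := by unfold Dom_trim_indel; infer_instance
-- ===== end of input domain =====

-- B binary-searches the largest trimmable common-suffix length (whole-slice comparisons)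
-- instead of A's linear backward character scan; same results, a different algorithm.

-- ===== PORT A =====
-- A's for-loop over i in range(1, min(len(ref), len(alt))), returning from inside the scan;
-- the fall-through case uses the leftover i = n-1.
def trimLoopA (ref alt : String) (n : Nat) (i : Nat) : String × String :=
  if i < n then
    if PySem.Str.pyGet? ref (-(i : Int)) ≠ PySem.Str.pyGet? alt (-(i : Int)) then
      if i = 1 then (ref, alt)
      else (PySem.Str.slice ref none (some (-(i : Int) + 1)),
            PySem.Str.slice alt none (some (-(i : Int) + 1)))
    else trimLoopA ref alt n (i + 1)
  else
    (PySem.Str.slice ref none (some (-((n - 1 : Nat) : Int))),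
     PySem.Str.slice alt none (some (-((n - 1 : Nat) : Int))))
termination_by n - i

def trim_indel (ref : String) (alt : String) : String × String :=
  if min ref.toList.length alt.toList.length ≤ 1 then (ref, alt)
  else if ref = alt then (ref, alt)  -- Python raises ValueError here; excluded by Pre_
  else trimLoopA ref alt (min ref.toList.length alt.toList.length) 1

-- ===== PORT B =====
-- B's binary search: invariant 'the last lo characters match, no suffix longer than hi can';
-- ref[len(ref) - mid:] is the nonnegative-start slice (mid ≤ hi ≤ n-1 < len in every call).
def bsearchB (ref alt : String) (lo hi : Nat) : Nat :=
  if lo < hi then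
    let mid := (lo + hi + 1) / 2
    if PySem.Str.slice ref (some ((ref.toList.length - mid : Nat) : Int)) none
       = PySem.Str.slice alt (some ((alt.toList.length - mid : Nat) : Int)) none
    then bsearchB ref alt mid hi
    else bsearchB ref alt lo (mid - 1)
  else lo
termination_by hi - lo
decreasing_by all_goals omega

def trim_indel_alt (ref : String) (alt : String) : String × String :=
  let n := min ref.toList.length alt.toList.length
  if n ≤ 1 then (ref, alt)
  else if ref = alt then (ref, alt)  -- Python raises ValueError here; excluded by Pre_
  else
    let k := bsearchB ref alt 0 (n - 1)
    if k = 0 then (ref, alt)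
    else (PySem.Str.slice ref none (some (-(k : Int))),
          PySem.Str.slice alt none (some (-(k : Int))))

-- ===== PRECONDITION & SPEC =====
-- Pre_ excludes exactly the inputs where the Python A raises ValueError: both strings
-- longer than 1 and equal.
def Pre_trim_indel (ref : String) (alt : String) : Prop :=
  ref = alt → min ref.toList.length alt.toList.length ≤ 1
instance (ref : String) (alt : String) : Decidable (Pre_trim_indel ref alt) := by
  unfold Pre_trim_indel; infer_instance

def pvWitness_trim_indel : String × String := ("TAG", "TCG")

def Spec_trim_indel (ref : String) (alt : String) (out : String × String) : Prop := out = trim_indel_alt ref alt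
instance (ref : String) (alt : String) (out : String × String) : Decidable (Spec_trim_indel ref alt out) := by unfold Spec_trim_indel; infer_instance

-- ===== CLAIM (what is proved, stated in full; the proofs are below) =====
def Claim_equal_trim_indel : Prop := ∀ (ref : String) (alt : String), Dom_trim_indel ref alt → Pre_trim_indel ref alt → Spec_trim_indel ref alt (trim_indel ref alt)

-- ===== LEMMAS AND PROOFS =====

-- 'the characters at distance t from the right ends agree'
def ceqP (ref alt : String) (t : Nat) : Prop :=
  ref.toList[ref.toList.length - 1 - t]? = alt.toList[alt.toList.length - 1 - t]?

-- proof-side reference count: the length of the trimmable common suffix (capped at n-1)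
-- (the condition is ceqP ref alt k written out, so stock Decidable instances apply)
def sfx (ref alt : String) (n : Nat) (k : Nat) : Nat :=
  if k < n - 1 ∧ ref.toList[ref.toList.length - 1 - k]? = alt.toList[alt.toList.length - 1 - k]?
  then sfx ref alt n (k + 1) else k
termination_by n - 1 - k

-- 'the last m characters of ref and alt agree', as a slice/drop equality
def sufEq (ref alt : String) (m : Nat) : Prop :=
  ref.toList.drop (ref.toList.length - m) = alt.toList.drop (alt.toList.length - m)

lemma chA (s : String) (i : Nat) (h1 : 1 ≤ i) (h2 : i ≤ s.toList.length) :
    PySem.Str.pyGet? s (-(i : Int)) = s.toList[s.toList.length - i]? := by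
  have := PySem.List.pyGet?_neg_natCast (xs := s.toList) (k := i) (by omega) (by simpa using h2)
  simpa using this

lemma loop_eq (ref alt : String) (n : Nat)
    (hr : n ≤ ref.toList.length) (ha : n ≤ alt.toList.length) (h2 : 2 ≤ n) :
    ∀ i, 1 ≤ i → i ≤ n →
      trimLoopA ref alt n i =
        (if sfx ref alt n (i - 1) = 0 then (ref, alt)
         else (PySem.Str.slice ref none (some (-((sfx ref alt n (i - 1)) : Int))),
               PySem.Str.slice alt none (some (-((sfx ref alt n (i - 1)) : Int))))) := by
  intro i
  induction hfuel : n - i using Nat.strong_induction_on generalizing i with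
  | _ fuel ih =>
    intro h1 hle
    rw [trimLoopA]
    by_cases hin : i < n
    · rw [if_pos hin]
      have hgr : PySem.Str.pyGet? ref (-(i : Int)) = ref.toList[ref.toList.length - i]? :=
        chA ref i h1 (by omega)
      have hga : PySem.Str.pyGet? alt (-(i : Int)) = alt.toList[alt.toList.length - i]? :=
        chA alt i h1 (by omega)
      have er : ref.toList.length - 1 - (i - 1) = ref.toList.length - i := by omega
      have ea : alt.toList.length - 1 - (i - 1) = alt.toList.length - i := by omega
      by_cases hc : ref.toList[ref.toList.length - i]? = alt.toList[alt.toList.length - i]?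
      · -- chars equal: A recurses, the reference counter steps
        have hcond : i - 1 < n - 1 ∧
            ref.toList[ref.toList.length - 1 - (i - 1)]? = alt.toList[alt.toList.length - 1 - (i - 1)]? :=
          ⟨by omega, by rw [er, ea]; exact hc⟩
        have hk : sfx ref alt n (i - 1) = sfx ref alt n ((i + 1) - 1) := by
          rw [sfx, if_pos hcond]; congr 1; omega
        rw [if_neg (by rw [hgr, hga]; exact not_not.mpr hc), hk]
        exact ih (n - (i + 1)) (by omega) (i + 1) rfl (by omega) (by omega)
      · -- mismatch: A returns, the counter stops at i - 1
        have hcond' : ¬ (i - 1 < n - 1 ∧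
            ref.toList[ref.toList.length - 1 - (i - 1)]? = alt.toList[alt.toList.length - 1 - (i - 1)]?) := by
          intro h
          exact hc (by have := h.2; rw [er, ea] at this; exact this)
        have hk : sfx ref alt n (i - 1) = i - 1 := by
          rw [sfx]; exact if_neg hcond'
        rw [if_pos (by rw [hgr, hga]; exact hc), hk]
        by_cases h1' : i = 1
        · rw [if_pos h1', if_pos (by omega)]
        · rw [if_neg h1', if_neg (by omega : ¬ i - 1 = 0),
              show (-(i : Int) + 1) = (-((i - 1 : Nat) : Int)) from by omega]
    · have hk : sfx ref alt n (i - 1) = i - 1 := by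
        rw [sfx]; exact if_neg (fun h => absurd h.1 (by omega : ¬ i - 1 < n - 1))
      rw [if_neg hin, hk, if_neg (by omega : ¬ i - 1 = 0), show i - 1 = n - 1 from by omega]

lemma sufEq_zero (ref alt : String) : sufEq ref alt 0 := by
  unfold sufEq; simp only [Nat.sub_zero]; rw [List.drop_length, List.drop_length]

lemma sufEq_succ (ref alt : String) (t : Nat)
    (hr : t + 1 ≤ ref.toList.length) (ha : t + 1 ≤ alt.toList.length) :
    sufEq ref alt (t + 1) ↔ ceqP ref alt t ∧ sufEq ref alt t := by
  unfold sufEq ceqP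
  have hr' : ref.toList.length - (t + 1) < ref.toList.length := by omega
  have ha' : alt.toList.length - (t + 1) < alt.toList.length := by omega
  rw [List.drop_eq_getElem_cons hr', List.drop_eq_getElem_cons ha']
  rw [show ref.toList.length - (t + 1) + 1 = ref.toList.length - t from by omega,
      show alt.toList.length - (t + 1) + 1 = alt.toList.length - t from by omega,
      show ref.toList.length - 1 - t = ref.toList.length - (t + 1) from by omega,
      show alt.toList.length - 1 - t = alt.toList.length - (t + 1) from by omega]
  constructor
  · intro h
    obtain ⟨h1, h2⟩ := List.cons.injEq _ _ _ _ ▸ h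
    exact ⟨by rw [List.getElem?_eq_getElem hr', List.getElem?_eq_getElem ha', h1], h2⟩
  · intro ⟨h1, h2⟩
    rw [List.getElem?_eq_getElem hr', List.getElem?_eq_getElem ha'] at h1
    rw [Option.some.injEq] at h1
    rw [h1, h2]

lemma sufEq_of_ceq (ref alt : String) (k : Nat)
    (hr : k ≤ ref.toList.length) (ha : k ≤ alt.toList.length)
    (h : ∀ t, t < k → ceqP ref alt t) : sufEq ref alt k := by
  induction k with
  | zero => exact sufEq_zero ref alt
  | succ t ih =>
      exact (sufEq_succ ref alt t hr ha).mpr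
        ⟨h t (by omega), ih (by omega) (by omega) (fun t' ht' => h t' (by omega))⟩

lemma sufEq_mono (ref alt : String) (m' m : Nat)
    (hr : m ≤ ref.toList.length) (ha : m ≤ alt.toList.length)
    (hle : m' ≤ m) (h : sufEq ref alt m) : sufEq ref alt m' := by
  induction m with
  | zero => exact (Nat.le_zero.mp hle) ▸ h
  | succ t ih =>
      by_cases he : m' = t + 1
      · exact he ▸ h
      · exact ih (by omega) (by omega) (by omega)
          ((sufEq_succ ref alt t hr ha).mp h).2

lemma ceq_of_sufEq (ref alt : String) (t m : Nat)
    (hr : m ≤ ref.toList.length) (ha : m ≤ alt.toList.length)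
    (ht : t < m) (h : sufEq ref alt m) : ceqP ref alt t :=
  ((sufEq_succ ref alt t (by omega) (by omega)).mp
    (sufEq_mono ref alt (t + 1) m hr ha (by omega) h)).1

-- the reference count's defining properties
lemma sfx_spec (ref alt : String) (n : Nat) :
    ∀ j, j ≤ n - 1 →
      j ≤ sfx ref alt n j ∧ sfx ref alt n j ≤ n - 1 ∧
      (∀ t, j ≤ t → t < sfx ref alt n j → ceqP ref alt t) ∧
      (sfx ref alt n j < n - 1 → ¬ ceqP ref alt (sfx ref alt n j)) := by
  intro j
  induction hfuel : n - 1 - j using Nat.strong_induction_on generalizing j with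
  | _ fuel ih =>
    intro hj
    rw [sfx]
    by_cases hc : j < n - 1 ∧
        ref.toList[ref.toList.length - 1 - j]? = alt.toList[alt.toList.length - 1 - j]?
    · rw [if_pos hc]
      obtain ⟨h1, h2, h3, h4⟩ := ih (n - 1 - (j + 1)) (by omega) (j + 1) rfl (by omega)
      refine ⟨by omega, h2, ?_, h4⟩
      intro t ht1 ht2
      by_cases he : t = j
      · exact he ▸ hc.2
      · exact h3 t (by omega) ht2
    · rw [if_neg hc]
      refine ⟨le_rfl, hj, fun t ht1 ht2 => absurd ht1 (by omega), fun hlt => ?_⟩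
      intro hce
      exact hc ⟨hlt, hce⟩

-- the slice comparison in B's binary search tests exactly sufEq
lemma slice_test (ref alt : String) (m : Nat) :
    (PySem.Str.slice ref (some ((ref.toList.length - m : Nat) : Int)) none
      = PySem.Str.slice alt (some ((alt.toList.length - m : Nat) : Int)) none)
    ↔ sufEq ref alt m := by
  unfold sufEq
  constructor
  · intro h
    have := congrArg String.toList h
    simpa [PySem.List.slice_from_natCast] using this
  · intro h
    apply String.toList_inj.mp
    simpa [PySem.List.slice_from_natCast] using h

lemma bsearch_eq (ref alt : String) (n : Nat)
    (_hr : n ≤ ref.toList.length) (_ha : n ≤ alt.toList.length) (h2 : 2 ≤ n) :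
    ∀ lo hi, lo ≤ sfx ref alt n 0 → sfx ref alt n 0 ≤ hi → hi ≤ n - 1 →
      bsearchB ref alt lo hi = sfx ref alt n 0 := by
  obtain ⟨-, hk1, hk2, hk3⟩ := sfx_spec ref alt n 0 (by omega)
  set k := sfx ref alt n 0 with hkdef
  have hMk : sufEq ref alt k :=
    sufEq_of_ceq ref alt k (by omega) (by omega) (fun t ht => hk2 t (by omega) ht)
  have hM_iff : ∀ m, m ≤ n - 1 → (sufEq ref alt m ↔ m ≤ k) := by
    intro m hm
    constructor
    · intro hMm
      by_contra hgt
      exact hk3 (by omega)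
        (ceq_of_sufEq ref alt k m (by omega) (by omega) (by omega) hMm)
    · intro hle
      exact sufEq_mono ref alt m k (by omega) (by omega) hle hMk
  intro lo hi
  induction hfuel : hi - lo using Nat.strong_induction_on generalizing lo hi with
  | _ fuel ih =>
    intro hlo hhi hn1
    rw [bsearchB]
    by_cases hlt : lo < hi
    · rw [if_pos hlt]
      set mid := (lo + hi + 1) / 2 with hmid
      have hmid1 : lo < mid := by omega
      have hmid2 : mid ≤ hi := by omega
      by_cases hc : PySem.Str.slice ref (some ((ref.toList.length - mid : Nat) : Int)) none
          = PySem.Str.slice alt (some ((alt.toList.length - mid : Nat) : Int)) none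
      · rw [if_pos hc]
        have hMm : sufEq ref alt mid :=
          (slice_test ref alt mid).mp hc
        exact ih (hi - mid) (by omega) mid hi rfl
          ((hM_iff mid (by omega)).mp hMm) hhi hn1
      · rw [if_neg hc]
        have hnM : ¬ sufEq ref alt mid := fun h =>
          hc ((slice_test ref alt mid).mpr h)
        have : ¬ mid ≤ k := fun h => hnM ((hM_iff mid (by omega)).mpr h)
        exact ih (mid - 1 - lo) (by omega) lo (mid - 1) rfl hlo (by omega) (by omega)
    · rw [if_neg hlt]; omega

-- ===== VERDICT (by name: the statement is the Claim_ definition above) =====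
theorem trim_indel_spec : Claim_equal_trim_indel := by
  intro ref alt _hdom hpre
  unfold Spec_trim_indel trim_indel trim_indel_alt
  by_cases hmin : min ref.toList.length alt.toList.length ≤ 1
  · simp only [if_pos hmin]
  · have hne : ref ≠ alt := fun h => hmin (hpre h)
    have h2 : 2 ≤ min ref.toList.length alt.toList.length := by omega
    simp only [if_neg hmin, if_neg hne]
    rw [loop_eq ref alt (min ref.toList.length alt.toList.length)
          (Nat.min_le_left _ _) (Nat.min_le_right _ _) h2 1 le_rfl (by omega),
        bsearch_eq ref alt (min ref.toList.length alt.toList.length)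
          (Nat.min_le_left _ _) (Nat.min_le_right _ _) h2 0 (min ref.toList.length alt.toList.length - 1)
          (by omega)
          ((sfx_spec ref alt (min ref.toList.length alt.toList.length) 0 (by omega)).2.1)
          le_rfl]
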